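-- pv_equiv track=rewrite | github.com/milanhorvatovic/skill-system-foundry | skill-system-foundry/scripts/lib/manifest.py | _find_first_child_key
-- ===== SOURCE A (Python) =====
-- def _find_first_child_key(
--     lines: list[str], parent_idx: int, child_indent: int,
-- ) -> int | None:
--     """Return the index of the first child key at *child_indent* under *parent_idx*.
--
--     Scans forward from *parent_idx* + 1 looking for a non-blank line
--     at exactly *child_indent* indentation.  Returns ``None`` when no
--     such line exists before the section ends.
--     """
--     parent_indent = len(lines[parent_idx]) - len(lines[parent_idx].lstrip())
--     for i in range(parent_idx + 1, len(lines)):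
--         line = lines[i]
--         if line.strip() == "":
--             continue
--         indent = len(line) - len(line.lstrip())
--         if indent <= parent_indent:
--             break
--         if indent == child_indent:
--             return i
--     return None
-- ===== SOURCE B (Python) =====
-- def _find_first_child_key(
--     lines: list[str], parent_idx: int, child_indent: int,
-- ) -> int | None:
--     """Two-phase: first delimit the section under parent_idx, then search it."""
--     probe = lines[parent_idx]
--     parent_indent = len(probe) - len(probe.lstrip())
--     # phase 1: extend the section while lines are blank or indented deeper
--     end = parent_idx + 1
--     while end < len(lines):
--         line = lines[end]
--         if line.strip() != "" and len(line) - len(line.lstrip()) <= parent_indent: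
--             break
--         end += 1
--     # phase 2: first non-blank line in the section at exactly child_indent
--     return next(
--         (i for i in range(parent_idx + 1, end)
--          if lines[i].strip() != ""
--          and len(lines[i]) - len(lines[i].lstrip()) == child_indent),
--         None,
--     )
-- ===== Notes on version B (the rewrite author's own statement) =====
-- stated objective: alternative
-- what changed: Replaces A's single scan with break/continue/return by a two-phase decomposition: a first pass computes the end of the parent's section, then a separate generator search returns the first non-blank line at child_indent inside that region.
import Mathlib
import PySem

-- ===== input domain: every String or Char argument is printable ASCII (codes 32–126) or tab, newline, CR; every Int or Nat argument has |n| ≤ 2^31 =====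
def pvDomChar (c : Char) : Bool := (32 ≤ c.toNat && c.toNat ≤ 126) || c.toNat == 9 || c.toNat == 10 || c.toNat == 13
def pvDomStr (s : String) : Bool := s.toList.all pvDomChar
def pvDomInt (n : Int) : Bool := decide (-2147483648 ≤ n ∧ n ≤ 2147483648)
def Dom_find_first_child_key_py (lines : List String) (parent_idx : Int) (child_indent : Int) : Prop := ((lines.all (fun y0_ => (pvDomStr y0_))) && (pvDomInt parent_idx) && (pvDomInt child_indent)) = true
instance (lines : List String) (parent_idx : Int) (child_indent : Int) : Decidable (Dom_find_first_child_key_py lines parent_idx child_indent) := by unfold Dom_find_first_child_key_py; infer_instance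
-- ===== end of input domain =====

-- B is the same task decomposed into two phases (find section end, then search it) instead of A's single loop with break/continue/return; same cost.

-- indentation of a line: len(line) - len(line.lstrip())
def pvIndent (s : String) : Int :=
  (PySem.Str.len s : Int) - (PySem.Str.len (PySem.Str.lstrip s) : Int)

-- ===== PORT A =====
-- A's for-loop over range(parent_idx+1, len(lines)), transcribed as recursion on the index
def ffcALoop (lines : List String) (pind cind : Int) (i : Int) : Option Int :=
  if _h : i < (lines.length : Int) then
    match PySem.List.pyGet? lines i with
    | none => none  -- unreachable under Pre_ (i ≥ parent_idx+1 ≥ -len+1)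
    | some line =>
      if PySem.Str.strip line == "" then ffcALoop lines pind cind (i + 1)
      else
        let indent := pvIndent line
        if indent ≤ pind then none
        else if indent == cind then some i
        else ffcALoop lines pind cind (i + 1)
  else none
termination_by ((lines.length : Int) - i).toNat
decreasing_by all_goals omega

def find_first_child_key_py (lines : List String) (parent_idx : Int) (child_indent : Int) : Option Int :=
  match PySem.List.pyGet? lines parent_idx with
  | none => none  -- IndexError, excluded by Pre_
  | some probe => ffcALoop lines (pvIndent probe) child_indent (parent_idx + 1)

-- ===== PORT B =====
-- phase 1: the while-loop that extends the section past blank or deeper-indented lines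
def ffcEnd (lines : List String) (pind : Int) (e : Int) : Int :=
  if _h : e < (lines.length : Int) then
    match PySem.List.pyGet? lines e with
    | none => e  -- unreachable under Pre_
    | some line =>
      if PySem.Str.strip line != "" && pvIndent line ≤ pind then e
      else ffcEnd lines pind (e + 1)
  else e
termination_by ((lines.length : Int) - e).toNat
decreasing_by all_goals omega

def find_first_child_key_py_alt (lines : List String) (parent_idx : Int) (child_indent : Int) : Option Int :=
  match PySem.List.pyGet? lines parent_idx with
  | none => none  -- IndexError, excluded by Pre_
  | some probe =>
    let pind := pvIndent probe
    let e := ffcEnd lines pind (parent_idx + 1)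
    -- phase 2: next(...) over the generator = first index in the section matching the predicate
    (PySem.List.pyRange (parent_idx + 1) e 1).find? (fun i =>
      let line := (PySem.List.pyGet? lines i).getD ""
      PySem.Str.strip line != "" && pvIndent line == child_indent)

-- ===== PRECONDITION & SPEC =====
-- A raises IndexError on lines[parent_idx] iff parent_idx is not a valid (possibly negative) Python index
def Pre_find_first_child_key_py (lines : List String) (parent_idx : Int) (child_indent : Int) : Prop :=
  PySem.Raise.InRange lines.length parent_idx
instance (lines : List String) (parent_idx : Int) (child_indent : Int) : Decidable (Pre_find_first_child_key_py lines parent_idx child_indent) := by unfold Pre_find_first_child_key_py; infer_instance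

def pvWitness_find_first_child_key_py : List String × Int × Int := (["a:", "  b: 1"], 0, 2)

def Spec_find_first_child_key_py (lines : List String) (parent_idx : Int) (child_indent : Int) (out : Option Int) : Prop := out = find_first_child_key_py_alt lines parent_idx child_indent
instance (lines : List String) (parent_idx : Int) (child_indent : Int) (out : Option Int) : Decidable (Spec_find_first_child_key_py lines parent_idx child_indent out) := by unfold Spec_find_first_child_key_py; infer_instance

-- ===== CLAIM (what is proved, stated in full; the proofs are below) =====
def Claim_equal_find_first_child_key_py : Prop := ∀ (lines : List String) (parent_idx : Int) (child_indent : Int), Dom_find_first_child_key_py lines parent_idx child_indent → Pre_find_first_child_key_py lines parent_idx child_indent → Spec_find_first_child_key_py lines parent_idx child_indent (find_first_child_key_py lines parent_idx child_indent)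

-- ===== LEMMAS AND PROOFS =====

theorem ffcEnd_ge (lines : List String) (pind : Int) (e : Int) : e ≤ ffcEnd lines pind e := by
  unfold ffcEnd
  split
  · rename_i h
    cases hg : PySem.List.pyGet? lines e with
    | none => simp
    | some line =>
      simp only
      split
      · exact le_refl _
      · have := ffcEnd_ge lines pind (e + 1)
        omega
  · exact le_refl _
termination_by ((lines.length : Int) - e).toNat
decreasing_by all_goals omega

theorem ffcALoop_eq (lines : List String) (pind cind : Int) (i : Int) :
    ffcALoop lines pind cind i =
      (PySem.List.pyRange i (ffcEnd lines pind i) 1).find? (fun j =>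
        let line := (PySem.List.pyGet? lines j).getD ""
        PySem.Str.strip line != "" && pvIndent line == cind) := by
  unfold ffcALoop ffcEnd
  split
  · rename_i h
    cases hg : PySem.List.pyGet? lines i with
    | none => simp [PySem.List.pyRange_one_eq_nil (le_refl i)]
    | some line =>
      simp only
      by_cases hb : PySem.Str.strip line = ""
      · -- blank line: A skips it, B's section extends past it and the search rejects it
        have hbeq : (PySem.Str.strip line == "") = true := by simp [hb]
        have hcond : (PySem.Str.strip line != "" && decide (pvIndent line ≤ pind)) = false := by
          simp [bne, hbeq]
        have hge := ffcEnd_ge lines pind (i + 1)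
        simp only [hbeq, if_true, hcond, Bool.false_eq_true, if_false]
        rw [PySem.List.pyRange_one_cons (by omega),
          List.find?_cons_of_neg (by simp [hg, bne, hb])]
        exact ffcALoop_eq lines pind cind (i + 1)
      · have hbeq : (PySem.Str.strip line == "") = false := by simp [hb]
        simp only [hbeq, Bool.false_eq_true, if_false]
        by_cases hle : pvIndent line ≤ pind
        · -- dedent: A breaks, B's section ends exactly here (empty search range)
          have hcond : (PySem.Str.strip line != "" && decide (pvIndent line ≤ pind)) = true := by
            simp [bne, hbeq, hle]
          rw [if_pos hle]
          simp [hcond, PySem.List.pyRange_one_eq_nil (le_refl i)]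
        · have hcond : (PySem.Str.strip line != "" && decide (pvIndent line ≤ pind)) = false := by
            simp [bne, hle]
          have hge := ffcEnd_ge lines pind (i + 1)
          rw [if_neg hle]
          simp only [hcond, Bool.false_eq_true, if_false]
          rw [PySem.List.pyRange_one_cons (by omega)]
          by_cases hc : pvIndent line = cind
          · rw [List.find?_cons_of_pos (by simp [hg, bne, hbeq, hc])]
            simp [hc]
          · rw [List.find?_cons_of_neg (by simp [hg, bne, hbeq, hc])]
            simp only [show (pvIndent line == cind) = false from by simp [hc],
              Bool.false_eq_true, if_false]
            exact ffcALoop_eq lines pind cind (i + 1)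
  · rename_i h
    simp [PySem.List.pyRange_one_eq_nil (le_refl i)]
termination_by ((lines.length : Int) - i).toNat
decreasing_by all_goals omega

-- ===== VERDICT (by name: the statement is the Claim_ definition above) =====
theorem find_first_child_key_py_spec : Claim_equal_find_first_child_key_py := by
  intro lines parent_idx child_indent _ _
  unfold Spec_find_first_child_key_py find_first_child_key_py find_first_child_key_py_alt
  cases hg : PySem.List.pyGet? lines parent_idx with
  | none => rfl
  | some probe => exact ffcALoop_eq lines (pvIndent probe) child_indent (parent_idx + 1)
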